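-- pv_equiv track=rewrite | github.com/GKCBACKHAM/Daily | 素数转圈问题1.1.py | divide_xy_ans
-- ===== SOURCE A (Python) =====
-- def extreme_value(max,min,x):
--     #极值
--     if x>=max:
--         max=x
--     if x<=min:
--         min=x
--     return(max,min)
--
-- def divide_xy_ans(n,delta_list):
--     #区分x,y方向位移并计算
--     x,y,xmax,xmin,ymax,ymin=0,0,0,0,0,0
--     for factor in range(n):
--         if factor%4==0:
--             x+=delta_list[factor]
--             xmax,xmin=extreme_value(xmax,xmin,x)
--             continue
--         elif factor%4==1:
--             y-=delta_list[factor]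
--             ymax,ymin=extreme_value(ymax,ymin,y)
--             continue
--         elif factor%4==2:
--             x-=delta_list[factor]
--             xmax,xmin=extreme_value(xmax,xmin,x)
--             continue
--         elif factor%4==3:
--             y+=delta_list[factor]
--             ymax,ymin=extreme_value(ymax,ymin,y)
--     xans=xmax-xmin
--     yans=ymax-ymin
--     return(xans,yans)
-- ===== SOURCE B (Python) =====
-- def divide_xy_ans(n, delta_list):
--     # partition the deltas into signed x- and y-contributions, build the
--     # prefix-sum position lists (starting at the origin 0), then reduce.
--     xmoves = [delta_list[f] if f % 4 == 0 else -delta_list[f]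
--               for f in range(n) if f % 2 == 0]
--     ymoves = [delta_list[f] if f % 4 == 3 else -delta_list[f]
--               for f in range(n) if f % 2 == 1]
--
--     def extent(moves):
--         pos = 0
--         positions = [0]
--         for m in moves:
--             pos += m
--             positions.append(pos)
--         return max(positions) - min(positions)
--
--     return (extent(xmoves), extent(ymoves))
-- ===== Notes on version B (the rewrite author's own statement) =====
-- stated objective: alternative
-- what changed: Replaces A's single fold with running min/max state by a partition of the deltas (by index residue mod 4) into signed x- and y-move lists, prefix-sum position lists starting at 0, and a final max-min reduction per axis.
import Mathlib
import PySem

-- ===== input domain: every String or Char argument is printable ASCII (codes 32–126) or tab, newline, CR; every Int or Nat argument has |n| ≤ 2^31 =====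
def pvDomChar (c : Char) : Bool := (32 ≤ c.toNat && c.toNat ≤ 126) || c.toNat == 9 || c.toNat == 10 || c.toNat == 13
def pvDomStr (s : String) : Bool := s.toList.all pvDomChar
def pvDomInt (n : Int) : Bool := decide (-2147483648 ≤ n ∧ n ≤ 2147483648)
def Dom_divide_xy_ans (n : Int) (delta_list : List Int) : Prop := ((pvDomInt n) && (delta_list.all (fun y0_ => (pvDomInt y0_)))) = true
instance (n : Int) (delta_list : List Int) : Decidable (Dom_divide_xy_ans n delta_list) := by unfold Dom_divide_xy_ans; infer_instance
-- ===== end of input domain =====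

-- B replaces A's single fold carrying running min/max state by a partition of the
-- deltas into signed x-/y-move lists, prefix-sum position lists starting at 0, and
-- a final max-min reduction per axis (same cost; a different decomposition).

-- ===== PORT A =====
def extreme_value (max min x : Int) : Int × Int :=
  let max := if x ≥ max then x else max
  let min := if x ≤ min then x else min
  (max, min)

-- the body of A's for-loop over `factor`
def pvAStep (dl : List Int) (st : Int × Int × Int × Int × Int × Int) (factor : Int) :
    Int × Int × Int × Int × Int × Int :=
  match st with
  | (x, y, xmax, xmin, ymax, ymin) =>
    -- delta_list[factor]; the IndexError case is excluded by Pre_divide_xy_ans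
    let d := PySem.List.pyGetD dl factor 0
    if PySem.Int.mod factor 4 == 0 then
      let x := x + d
      let (xmax, xmin) := extreme_value xmax xmin x
      (x, y, xmax, xmin, ymax, ymin)
    else if PySem.Int.mod factor 4 == 1 then
      let y := y - d
      let (ymax, ymin) := extreme_value ymax ymin y
      (x, y, xmax, xmin, ymax, ymin)
    else if PySem.Int.mod factor 4 == 2 then
      let x := x - d
      let (xmax, xmin) := extreme_value xmax xmin x
      (x, y, xmax, xmin, ymax, ymin)
    else if PySem.Int.mod factor 4 == 3 then
      let y := y + d
      let (ymax, ymin) := extreme_value ymax ymin y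
      (x, y, xmax, xmin, ymax, ymin)
    else (x, y, xmax, xmin, ymax, ymin)

def divide_xy_ans (n : Int) (delta_list : List Int) : Int × Int :=
  let s := (PySem.List.pyRange 0 n 1).foldl (pvAStep delta_list) (0, 0, 0, 0, 0, 0)
  (s.2.2.1 - s.2.2.2.1, s.2.2.2.2.1 - s.2.2.2.2.2)

-- ===== PORT B =====
-- the two list comprehensions of Source B, over the index list r = range(n)
def pvXMoves (dl : List Int) (r : List Int) : List Int :=
  (r.filter (fun f => PySem.Int.mod f 2 == 0)).map
    (fun f => if PySem.Int.mod f 4 == 0 then PySem.List.pyGetD dl f 0 else -(PySem.List.pyGetD dl f 0))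

def pvYMoves (dl : List Int) (r : List Int) : List Int :=
  (r.filter (fun f => PySem.Int.mod f 2 == 1)).map
    (fun f => if PySem.Int.mod f 4 == 3 then PySem.List.pyGetD dl f 0 else -(PySem.List.pyGetD dl f 0))

-- the body of Source B's extent loop: (pos, positions) ↦ (pos + m, positions ++ [pos + m])
def pvExtentStep (acc : Int × List Int) (m : Int) : Int × List Int :=
  (acc.1 + m, acc.2 ++ [acc.1 + m])

def pvExtent (moves : List Int) : Int :=
  let positions := (moves.foldl pvExtentStep (0, [0])).2
  ((PySem.List.max? positions (fun y => y)).getD 0) - ((PySem.List.min? positions (fun y => y)).getD 0)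

def divide_xy_ans_alt (n : Int) (delta_list : List Int) : Int × Int :=
  let r := PySem.List.pyRange 0 n 1
  (pvExtent (pvXMoves delta_list r), pvExtent (pvYMoves delta_list r))

-- ===== PRECONDITION & SPEC =====
-- Python A raises IndexError when n exceeds len(delta_list) (so does B); Pre_ excludes exactly that.
def Pre_divide_xy_ans (n : Int) (delta_list : List Int) : Prop := n ≤ delta_list.length
instance (n : Int) (delta_list : List Int) : Decidable (Pre_divide_xy_ans n delta_list) := by unfold Pre_divide_xy_ans; infer_instance

def pvWitness_divide_xy_ans : Int × List Int := (5, [3, 1, 4, 1, 5])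

def Spec_divide_xy_ans (n : Int) (delta_list : List Int) (out : Int × Int) : Prop := out = divide_xy_ans_alt n delta_list
instance (n : Int) (delta_list : List Int) (out : Int × Int) : Decidable (Spec_divide_xy_ans n delta_list out) := by unfold Spec_divide_xy_ans; infer_instance

-- ===== CLAIM (what is proved, stated in full; the proofs are below) =====
def Claim_equal_divide_xy_ans : Prop := ∀ (n : Int) (delta_list : List Int), Dom_divide_xy_ans n delta_list → Pre_divide_xy_ans n delta_list → Spec_divide_xy_ans n delta_list (divide_xy_ans n delta_list)

-- ===== LEMMAS AND PROOFS =====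

-- positions appended after starting point p
def pvPosAux (p : Int) : List Int → List Int
  | [] => []
  | m :: t => (p + m) :: pvPosAux (p + m) t

-- max / min over all prefix-sum positions starting at p (p included)
def pvHi (p : Int) : List Int → Int
  | [] => p
  | m :: t => max p (pvHi (p + m) t)

def pvLo (p : Int) : List Int → Int
  | [] => p
  | m :: t => min p (pvLo (p + m) t)

theorem pv_le_hi (ms : List Int) : ∀ p : Int, p ≤ pvHi p ms := by
  induction ms with
  | nil => intro p; exact le_refl p
  | cons m t _ => intro p; exact le_max_left _ _

theorem pv_lo_le (ms : List Int) : ∀ p : Int, pvLo p ms ≤ p := by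
  induction ms with
  | nil => intro p; exact le_refl p
  | cons m t _ => intro p; exact min_le_left _ _

theorem pv_foldB (ms : List Int) : ∀ (p : Int) (l : List Int),
    ms.foldl pvExtentStep (p, l) = (p + ms.sum, l ++ pvPosAux p ms) := by
  induction ms with
  | nil => intro p l; simp [pvPosAux]
  | cons m t ih =>
      intro p l
      simp only [List.foldl_cons, pvExtentStep, pvPosAux, ih, List.sum_cons]
      simp [List.append_assoc, add_assoc]

theorem pv_foldl_max_gen (ms : List Int) : ∀ (p q : Int),
    (pvPosAux p ms).foldl max (max q p) = max q (pvHi p ms) := by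
  induction ms with
  | nil => intro p q; simp [pvPosAux, pvHi]
  | cons m t ih =>
      intro p q
      simp only [pvPosAux, pvHi, List.foldl_cons]
      rw [ih (p + m) (max q p), max_assoc]

theorem pv_foldl_min_gen (ms : List Int) : ∀ (p q : Int),
    (pvPosAux p ms).foldl min (min q p) = min q (pvLo p ms) := by
  induction ms with
  | nil => intro p q; simp [pvPosAux, pvLo]
  | cons m t ih =>
      intro p q
      simp only [pvPosAux, pvLo, List.foldl_cons]
      rw [ih (p + m) (min q p), min_assoc]

theorem pv_foldl_max (ms : List Int) (p : Int) :
    (pvPosAux p ms).foldl max p = pvHi p ms := by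
  have h := pv_foldl_max_gen ms p p
  rw [max_self] at h
  rw [h, max_eq_right (pv_le_hi ms p)]

theorem pv_foldl_min (ms : List Int) (p : Int) :
    (pvPosAux p ms).foldl min p = pvLo p ms := by
  have h := pv_foldl_min_gen ms p p
  rw [min_self] at h
  rw [h, min_eq_right (pv_lo_le ms p)]

theorem pv_extent_eq (ms : List Int) : pvExtent ms = pvHi 0 ms - pvLo 0 ms := by
  unfold pvExtent
  rw [pv_foldB]
  simp only [List.singleton_append]
  rw [PySem.List.max?_id_cons, PySem.List.min?_id_cons]
  simp [pv_foldl_max, pv_foldl_min]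

theorem pvHi_append (ms : List Int) : ∀ (p m : Int),
    pvHi p (ms ++ [m]) = max (pvHi p ms) (p + ms.sum + m) := by
  induction ms with
  | nil => intro p m; simp [pvHi]
  | cons a t ih =>
      intro p m
      simp only [List.cons_append, pvHi, ih, List.sum_cons]
      rw [max_assoc]
      have e : p + a + t.sum + m = p + (a + t.sum) + m := by ring
      rw [e]

theorem pvLo_append (ms : List Int) : ∀ (p m : Int),
    pvLo p (ms ++ [m]) = min (pvLo p ms) (p + ms.sum + m) := by
  induction ms with
  | nil => intro p m; simp [pvLo]
  | cons a t ih =>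
      intro p m
      simp only [List.cons_append, pvLo, ih, List.sum_cons]
      rw [min_assoc]
      have e : p + a + t.sum + m = p + (a + t.sum) + m := by ring
      rw [e]

theorem pv_xm_app0 (dl r : List Int) (k : Nat) (h : k % 4 = 0) :
    pvXMoves dl (r ++ [(k : Int)]) = pvXMoves dl r ++ [PySem.List.pyGetD dl (k : Int) 0] := by
  simp [pvXMoves, List.filter_append]
  refine ⟨(k : Int), ?_, ?_⟩
  · simp [show ((k : Int) % 2 == 0) = true from by rw [beq_iff_eq]; omega]
  · rw [if_pos (show (4 : Int) ∣ (k : Int) from by omega)]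
    simp

theorem pv_xm_app2 (dl r : List Int) (k : Nat) (h : k % 4 = 2) :
    pvXMoves dl (r ++ [(k : Int)]) = pvXMoves dl r ++ [-(PySem.List.pyGetD dl (k : Int) 0)] := by
  simp [pvXMoves, List.filter_append]
  refine ⟨(k : Int), ?_, ?_⟩
  · simp [show ((k : Int) % 2 == 0) = true from by rw [beq_iff_eq]; omega]
  · rw [if_neg (show ¬ (4 : Int) ∣ (k : Int) from by omega)]
    simp

theorem pv_xm_app_odd (dl r : List Int) (k : Nat) (h : k % 2 = 1) :
    pvXMoves dl (r ++ [(k : Int)]) = pvXMoves dl r := by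
  simp [pvXMoves, List.filter_append]
  omega

theorem pv_ym_app1 (dl r : List Int) (k : Nat) (h : k % 4 = 1) :
    pvYMoves dl (r ++ [(k : Int)]) = pvYMoves dl r ++ [-(PySem.List.pyGetD dl (k : Int) 0)] := by
  simp [pvYMoves, List.filter_append]
  refine ⟨(k : Int), ?_, ?_⟩
  · simp [show ((k : Int) % 2 == 1) = true from by rw [beq_iff_eq]; omega]
  · rw [if_neg (show ¬ ((k : Int) % 4 = 3) from by omega)]
    simp

theorem pv_ym_app3 (dl r : List Int) (k : Nat) (h : k % 4 = 3) :
    pvYMoves dl (r ++ [(k : Int)]) = pvYMoves dl r ++ [PySem.List.pyGetD dl (k : Int) 0] := by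
  simp [pvYMoves, List.filter_append]
  refine ⟨(k : Int), ?_, ?_⟩
  · simp [show ((k : Int) % 2 == 1) = true from by rw [beq_iff_eq]; omega]
  · rw [if_pos (show (k : Int) % 4 = 3 from by omega)]
    simp

theorem pv_ym_app_even (dl r : List Int) (k : Nat) (h : k % 2 = 0) :
    pvYMoves dl (r ++ [(k : Int)]) = pvYMoves dl r := by
  simp [pvYMoves, List.filter_append]
  omega

-- A's loop state after processing range(k), expressed through B's move lists
theorem pv_main (dl : List Int) (k : Nat) :
    (PySem.List.pyRange 0 (k : Int) 1).foldl (pvAStep dl) (0, 0, 0, 0, 0, 0)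
      = ((pvXMoves dl (PySem.List.pyRange 0 (k : Int) 1)).sum,
         (pvYMoves dl (PySem.List.pyRange 0 (k : Int) 1)).sum,
         pvHi 0 (pvXMoves dl (PySem.List.pyRange 0 (k : Int) 1)),
         pvLo 0 (pvXMoves dl (PySem.List.pyRange 0 (k : Int) 1)),
         pvHi 0 (pvYMoves dl (PySem.List.pyRange 0 (k : Int) 1)),
         pvLo 0 (pvYMoves dl (PySem.List.pyRange 0 (k : Int) 1))) := by
  induction k with
  | zero =>
      have h0 : PySem.List.pyRange 0 ((0 : Nat) : Int) 1 = [] := by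
        rw [Nat.cast_zero]; exact PySem.List.pyRange_one_eq_nil le_rfl
      rw [h0]; simp [pvXMoves, pvYMoves, pvHi, pvLo]
  | succ k ih =>
      have hsplit : PySem.List.pyRange 0 ((k + 1 : Nat) : Int) 1
          = PySem.List.pyRange 0 (k : Int) 1 ++ [(k : Int)] := by
        push_cast
        exact PySem.List.pyRange_one_succ_right (Int.natCast_nonneg k)
      rw [hsplit, List.foldl_append, ih]
      simp only [List.foldl_cons, List.foldl_nil]
      have hk4 : k % 4 = 0 ∨ k % 4 = 1 ∨ k % 4 = 2 ∨ k % 4 = 3 := by omega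
      rcases hk4 with h | h | h | h
      · have c4 : (4 : Int) ∣ (k : Int) := by omega
        rw [pv_xm_app0 dl _ k h, pv_ym_app_even dl _ k (by omega), pvHi_append, pvLo_append]
        simp [pvAStep, extreme_value, c4, Prod.ext_iff]
        omega
      · have nc0 : ¬ (4 : Int) ∣ (k : Int) := by omega
        have c1 : (k : Int) % 4 = 1 := by omega
        rw [pv_xm_app_odd dl _ k (by omega), pv_ym_app1 dl _ k h, pvHi_append, pvLo_append]
        simp [pvAStep, extreme_value, c1, Prod.ext_iff]
        omega
      · have nc0 : ¬ (4 : Int) ∣ (k : Int) := by omega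
        have c2 : (k : Int) % 4 = 2 := by omega
        rw [pv_xm_app2 dl _ k h, pv_ym_app_even dl _ k (by omega), pvHi_append, pvLo_append]
        simp [pvAStep, extreme_value, c2, Prod.ext_iff]
        omega
      · have nc0 : ¬ (4 : Int) ∣ (k : Int) := by omega
        have c3 : (k : Int) % 4 = 3 := by omega
        rw [pv_xm_app_odd dl _ k (by omega), pv_ym_app3 dl _ k h, pvHi_append, pvLo_append]
        simp [pvAStep, extreme_value, c3, Prod.ext_iff]
        omega

theorem pv_bridge (k : Nat) (dl : List Int) :
    divide_xy_ans (k : Int) dl = divide_xy_ans_alt (k : Int) dl := by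
  simp only [divide_xy_ans, divide_xy_ans_alt]
  rw [pv_main]
  simp [pv_extent_eq]

-- ===== VERDICT (by name: the statement is the Claim_ definition above) =====
theorem divide_xy_ans_spec : Claim_equal_divide_xy_ans := by
  intro n dl _ _
  unfold Spec_divide_xy_ans
  by_cases hn : 0 ≤ n
  · obtain ⟨k, rfl⟩ : ∃ k : Nat, n = (k : Int) := ⟨n.toNat, (Int.toNat_of_nonneg hn).symm⟩
    exact pv_bridge k dl
  · have hnil : PySem.List.pyRange 0 n 1 = [] := PySem.List.pyRange_one_eq_nil (by omega)
    simp [divide_xy_ans, divide_xy_ans_alt, hnil, pvXMoves, pvYMoves, pv_extent_eq, pvHi, pvLo]
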